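-- pv_equiv track=rewrite | github.com/juan-aguilera/Homework-6 | data_parsing_and_plotting.py | numeric_assignation
-- ===== SOURCE A (Python) =====
-- def numeric_assignation(string_list:list[str]) -> dict :
--      numbers_assignation = {}
--      cnt = 1
--      for i in string_list:
--         if i not in numbers_assignation.keys():
--             numbers_assignation[i] = cnt
--             cnt += 1
--      return numbers_assignation
-- ===== SOURCE B (Python) =====
-- def numeric_assignation(string_list: list[str]) -> dict:
--     # Closed-form per element: an element gets an entry exactly at its first
--     # occurrence, and its id is the number of distinct strings seen strictly
--     # before it, plus one.  No running counter, no dict membership test.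
--     return {x: len(set(string_list[:i])) + 1
--             for i, x in enumerate(string_list)
--             if x not in string_list[:i]}
-- ===== Notes on version B (the rewrite author's own statement) =====
-- stated objective: alternative
-- what changed: Replaces A's single stateful pass (running counter + membership test against the dict being built) by a stateless closed form: for each position, the element is emitted iff it does not occur in the list prefix before it, and its id is computed as the number of distinct strings in that prefix plus one; no counter and no incremental dict are maintained.
import Mathlib
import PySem

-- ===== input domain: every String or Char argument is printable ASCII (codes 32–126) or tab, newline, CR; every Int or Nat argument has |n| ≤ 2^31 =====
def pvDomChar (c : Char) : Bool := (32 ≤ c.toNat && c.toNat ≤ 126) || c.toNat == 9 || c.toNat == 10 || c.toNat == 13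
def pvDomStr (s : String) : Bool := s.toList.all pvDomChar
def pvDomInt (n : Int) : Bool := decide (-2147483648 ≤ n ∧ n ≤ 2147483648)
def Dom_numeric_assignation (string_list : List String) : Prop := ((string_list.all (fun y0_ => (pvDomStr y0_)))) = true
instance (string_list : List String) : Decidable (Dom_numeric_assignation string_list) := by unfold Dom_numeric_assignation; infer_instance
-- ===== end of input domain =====

-- B replaces A's stateful pass (running counter + dict membership) by a stateless closed form:
-- each element is kept iff absent from the prefix before it, its id = distinct strings in that prefix + 1.

-- ===== PORT A =====
-- one pass: skip keys already present, otherwise insert with the running counter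
def numeric_assignation (string_list : List String) : List (String × Int) :=
  (string_list.foldl
    (fun (st : PySem.Dict String Int × Int) i =>
      if !st.1.contains i then (st.1.insert i st.2, st.2 + 1) else st)
    (PySem.Dict.empty, 1)).1.items

-- ===== PORT B =====
-- dict comprehension over enumerate: filter 'x not in string_list[:i]',
-- value 'len(set(string_list[:i])) + 1'; slices via PySem.List.slice, set via PySem.Set.ofList
def numeric_assignation_alt (string_list : List String) : List (String × Int) :=
  ((PySem.List.enumerate string_list 0).foldl
    (fun (d : PySem.Dict String Int) p =>
      if decide (p.2 ∈ PySem.List.slice string_list none (some p.1)) then d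
      else d.insert p.2
        (((PySem.Set.ofList (PySem.List.slice string_list none (some p.1))).length : Int) + 1))
    PySem.Dict.empty).items

-- ===== PRECONDITION & SPEC =====
def Spec_numeric_assignation (string_list : List String) (out : List (String × Int)) : Prop := out = numeric_assignation_alt string_list
instance (string_list : List String) (out : List (String × Int)) : Decidable (Spec_numeric_assignation string_list out) := by unfold Spec_numeric_assignation; infer_instance

-- ===== CLAIM (what is proved, stated in full; the proofs are below) =====
def Claim_equal_numeric_assignation : Prop := ∀ (string_list : List String), Dom_numeric_assignation string_list → Spec_numeric_assignation string_list (numeric_assignation string_list)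

-- ===== LEMMAS AND PROOFS =====

-- loop invariant of A's pass (induction from the right):
-- the dict's items are the enumerated dedup, and the counter is its length + 1
lemma na_invariant (xs : List String) :
    (xs.foldl
      (fun (st : PySem.Dict String Int × Int) i =>
        if !st.1.contains i then (st.1.insert i st.2, st.2 + 1) else st)
      (PySem.Dict.empty, 1)).1.items
      = (PySem.List.enumerate (PySem.List.dedup xs) 1).map (fun p => (p.2, p.1))
    ∧ (xs.foldl
      (fun (st : PySem.Dict String Int × Int) i =>
        if !st.1.contains i then (st.1.insert i st.2, st.2 + 1) else st)
      (PySem.Dict.empty, 1)).2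
      = (PySem.List.dedup xs).length + 1 := by
  induction xs using List.reverseRecOn with
  | nil => exact ⟨rfl, rfl⟩
  | append_singleton xs x ih =>
    obtain ⟨hitems, hcnt⟩ := ih
    set st := (xs.foldl
      (fun (st : PySem.Dict String Int × Int) i =>
        if !st.1.contains i then (st.1.insert i st.2, st.2 + 1) else st)
      (PySem.Dict.empty, 1)) with hst
    have hkeys : st.1.keys = PySem.List.dedup xs := by
      have h0 : st.1.keys = st.1.items.map (·.1) := rfl
      rw [h0, hitems, List.map_map]
      exact PySem.List.map_snd_enumerate _ _
    have hcontains : st.1.contains x = decide (x ∈ PySem.List.dedup xs) := by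
      rw [PySem.Dict.contains_eq_decide_mem_keys, hkeys]
    rw [List.foldl_append]
    simp only [List.foldl_cons, List.foldl_nil]
    by_cases hx : x ∈ xs
    · have hxd : x ∈ PySem.List.dedup xs := by
        rw [PySem.List.dedup_eq_ofList]; exact (PySem.Set.mem_ofList _ _).mpr hx
      have hc : st.1.contains x = true := by rw [hcontains]; exact decide_eq_true hxd
      rw [hc]
      simp only [Bool.not_true, Bool.false_eq_true, if_false]
      have hdedup : PySem.List.dedup (xs ++ [x]) = PySem.List.dedup xs := by
        simp only [PySem.List.dedup_eq_ofList, PySem.Set.ofList_append_singleton]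
        exact PySem.Set.add_of_mem hxd
      exact ⟨by rw [hdedup]; exact hitems, by rw [hdedup]; exact hcnt⟩
    · have hxd : x ∉ PySem.List.dedup xs := by
        rw [PySem.List.dedup_eq_ofList]
        exact fun h => hx ((PySem.Set.mem_ofList _ _).mp h)
      have hc : st.1.contains x = false := by rw [hcontains]; exact decide_eq_false hxd
      rw [hc]
      simp only [Bool.not_false, if_true]
      have hdedup : PySem.List.dedup (xs ++ [x]) = PySem.List.dedup xs ++ [x] := by
        simp only [PySem.List.dedup_eq_ofList, PySem.Set.ofList_append_singleton]
        exact PySem.Set.add_of_not_mem hxd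
      constructor
      · rw [show (st.1.insert x st.2).items = st.1.items ++ [(x, st.2)] by
              simp [PySem.Dict.items_insert, hc],
            hitems, hdedup, PySem.List.enumerate_append]
        simp [PySem.List.enumerate, hcnt]
        ring
      · rw [hdedup, hcnt]
        simp

-- invariant of B's comprehension over the enumeration of xs (induction from the right);
-- ys is the full list whose prefixes the comprehension slices, restricted to ys = xs at the end
lemma nb_invariant (xs : List String) :
    ((PySem.List.enumerate xs 0).foldl
      (fun (d : PySem.Dict String Int) p =>
        if decide (p.2 ∈ PySem.List.slice xs none (some p.1)) then d
        else d.insert p.2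
          (((PySem.Set.ofList (PySem.List.slice xs none (some p.1))).length : Int) + 1))
      PySem.Dict.empty).items
      = (PySem.List.enumerate (PySem.List.dedup xs) 1).map (fun p => (p.2, p.1)) := by
  induction xs using List.reverseRecOn with
  | nil => rfl
  | append_singleton xs x ih =>
    -- split the enumeration at the last element
    rw [PySem.List.enumerate_append]
    simp only [List.foldl_append, PySem.List.enumerate_cons, PySem.List.enumerate_nil,
      List.foldl_cons, List.foldl_nil, Int.zero_add]
    -- over the first part, slicing xs ++ [x] is the same as slicing xs
    have hcong :
        (PySem.List.enumerate xs 0).foldl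
          (fun (d : PySem.Dict String Int) p =>
            if decide (p.2 ∈ PySem.List.slice (xs ++ [x]) none (some p.1)) then d
            else d.insert p.2
              (((PySem.Set.ofList (PySem.List.slice (xs ++ [x]) none (some p.1))).length : Int) + 1))
          PySem.Dict.empty
        = (PySem.List.enumerate xs 0).foldl
          (fun (d : PySem.Dict String Int) p =>
            if decide (p.2 ∈ PySem.List.slice xs none (some p.1)) then d
            else d.insert p.2
              (((PySem.Set.ofList (PySem.List.slice xs none (some p.1))).length : Int) + 1))
          PySem.Dict.empty := by
      apply PySem.List.foldl_congr_mem
      intro acc p hp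
      obtain ⟨k, hk, rfl⟩ := (PySem.List.mem_enumerate_iff _ _ _).mp hp
      have hsl : PySem.List.slice (xs ++ [x]) none (some ((0 : Int) + k))
          = PySem.List.slice xs none (some ((0 : Int) + k)) := by
        simp only [Int.zero_add, PySem.List.slice_to_natCast]
        exact List.take_append_of_le_length (Nat.le_of_lt hk)
      rw [hsl]
    rw [hcong]
    set d := (PySem.List.enumerate xs 0).foldl
      (fun (d : PySem.Dict String Int) p =>
        if decide (p.2 ∈ PySem.List.slice xs none (some p.1)) then d
        else d.insert p.2
          (((PySem.Set.ofList (PySem.List.slice xs none (some p.1))).length : Int) + 1))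
      PySem.Dict.empty with hd
    -- the last step slices the whole of xs
    have hsl : PySem.List.slice (xs ++ [x]) none (some ((xs.length : Nat) : Int)) = xs := by
      rw [PySem.List.slice_to_natCast]
      exact List.take_left ..
    have hkeys : d.keys = PySem.List.dedup xs := by
      have h0 : d.keys = d.items.map (·.1) := rfl
      rw [h0, ih, List.map_map]
      exact PySem.List.map_snd_enumerate _ _
    by_cases hx : x ∈ xs
    · have hdedup : PySem.List.dedup (xs ++ [x]) = PySem.List.dedup xs := by
        simp only [PySem.List.dedup_eq_ofList, PySem.Set.ofList_append_singleton]
        exact PySem.Set.add_of_mem ((PySem.Set.mem_ofList _ _).mpr hx)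
      rw [hsl, if_pos (by simpa using hx), hdedup]
      exact ih
    · have hxd : x ∉ PySem.List.dedup xs := by
        rw [PySem.List.dedup_eq_ofList]
        exact fun h => hx ((PySem.Set.mem_ofList _ _).mp h)
      have hc : d.contains x = false := by
        rw [PySem.Dict.contains_eq_decide_mem_keys, hkeys]
        exact decide_eq_false hxd
      have hdedup : PySem.List.dedup (xs ++ [x]) = PySem.List.dedup xs ++ [x] := by
        simp only [PySem.List.dedup_eq_ofList, PySem.Set.ofList_append_singleton]
        exact PySem.Set.add_of_not_mem hxd
      rw [hsl, if_neg (by simpa using hx)]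
      rw [show (d.insert x (((PySem.Set.ofList xs).length : Int) + 1)).items
            = d.items ++ [(x, ((PySem.Set.ofList xs).length : Int) + 1)] by
            simp [PySem.Dict.items_insert, hc],
          ih, hdedup, PySem.List.enumerate_append]
      simp [PySem.List.enumerate, PySem.List.dedup_eq_ofList]
      ring

-- ===== VERDICT (by name: the statement is the Claim_ definition above) =====
theorem numeric_assignation_spec : Claim_equal_numeric_assignation := by
  intro xs _
  unfold Spec_numeric_assignation numeric_assignation numeric_assignation_alt
  rw [(na_invariant xs).1, nb_invariant xs]
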